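-- pv_equiv track=rewrite | github.com/zhuzhouyue123/IBI1_2023-24 | Practical9/Favourite_James_Bond.py | find_favorite_bond_actor
-- ===== SOURCE A (Python) =====
-- def find_favorite_bond_actor(birth_year):
--     bond_actors = { # the dict contain the name and the year interval
--         "Roger Moore": (1973, 1986),
--         "Timothy Dalton": (1987, 1994),
--         "Pierce Brosnan": (1995, 2005),
--         "Daniel Craig": (2006, 2021)
--     }
--
--     age_18_year = birth_year + 18
--
--     for actor, (start_year, end_year) in bond_actors.items():
--         if start_year <= age_18_year <= end_year:
--             return actor
--
--     return "Unknown"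
-- ===== SOURCE B (Python) =====
-- def _bisect_right(bps, y):
--     lo, hi = 0, len(bps)
--     while lo < hi:
--         mid = (lo + hi) // 2
--         if y < bps[mid]:
--             hi = mid
--         else:
--             lo = mid + 1
--     return lo
--
-- def find_favorite_bond_actor(birth_year):
--     bps = [1973, 1987, 1995, 2006, 2022]
--     names = ["Roger Moore", "Timothy Dalton", "Pierce Brosnan", "Daniel Craig"]
--     y = birth_year + 18
--     i = _bisect_right(bps, y)
--     if i == 0 or i == len(bps):
--         return "Unknown"
--     return names[i - 1]
-- ===== Notes on version B (the rewrite author's own statement) =====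
-- stated objective: alternative
-- what changed: Replaces the per-actor (start,end) range scan over the dict with a sorted breakpoint table queried by a hand-written binary search (bisect_right), exploiting the contiguity of the tenures.
import Mathlib
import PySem

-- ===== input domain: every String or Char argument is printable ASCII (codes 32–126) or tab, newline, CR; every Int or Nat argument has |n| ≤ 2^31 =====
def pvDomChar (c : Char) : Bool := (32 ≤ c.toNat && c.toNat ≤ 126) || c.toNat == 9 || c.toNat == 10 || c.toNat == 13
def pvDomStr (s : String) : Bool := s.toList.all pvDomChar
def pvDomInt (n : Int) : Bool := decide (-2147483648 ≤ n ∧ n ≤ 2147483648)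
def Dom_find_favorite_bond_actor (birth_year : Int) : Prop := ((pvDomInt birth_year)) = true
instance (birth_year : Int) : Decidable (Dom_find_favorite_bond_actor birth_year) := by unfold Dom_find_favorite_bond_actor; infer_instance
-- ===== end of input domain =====

-- B replaces A's per-actor range scan with a binary search over sorted tenure breakpoints (alternative data structure).


-- ===== PORT A =====
-- loop over the dict's items, returning the first actor whose tenure contains age_18_year
def pvScanA (y : Int) : List (String × Int × Int) → String
  | [] => "Unknown"
  | (actor, s, e) :: rest => if s ≤ y ∧ y ≤ e then actor else pvScanA y rest

def find_favorite_bond_actor (birth_year : Int) : String :=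
  let bond_actors : List (String × Int × Int) :=
    [("Roger Moore", 1973, 1986), ("Timothy Dalton", 1987, 1994),
     ("Pierce Brosnan", 1995, 2005), ("Daniel Craig", 2006, 2021)]
  let age_18_year := birth_year + 18
  pvScanA age_18_year bond_actors

-- ===== PORT B =====
-- hand-written bisect_right: while lo < hi: mid = (lo+hi)//2; if y < bps[mid]: hi = mid else lo = mid+1
-- (the fuel argument hi - lo is a totality guard only; it bounds the loop's iteration count)
def pvBisectGo (bps : List Int) (y : Int) : Nat → Nat → Nat → Nat
  | 0, lo, _ => lo
  | fuel + 1, lo, hi =>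
    if lo < hi then
      let mid := (lo + hi) / 2
      if y < bps.getD mid 0 then pvBisectGo bps y fuel lo mid
      else pvBisectGo bps y fuel (mid + 1) hi
    else lo

def pvBisectRight (bps : List Int) (y : Int) (lo hi : Nat) : Nat :=
  pvBisectGo bps y (hi - lo) lo hi

def find_favorite_bond_actor_alt (birth_year : Int) : String :=
  let bps : List Int := [1973, 1987, 1995, 2006, 2022]
  let names : List String := ["Roger Moore", "Timothy Dalton", "Pierce Brosnan", "Daniel Craig"]
  let y := birth_year + 18
  let i := pvBisectRight bps y 0 bps.length
  if i = 0 ∨ i = bps.length then "Unknown"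
  else names.getD (i - 1) "Unknown"

-- ===== PRECONDITION & SPEC =====
def Spec_find_favorite_bond_actor (birth_year : Int) (out : String) : Prop := out = find_favorite_bond_actor_alt birth_year
instance (birth_year : Int) (out : String) : Decidable (Spec_find_favorite_bond_actor birth_year out) := by unfold Spec_find_favorite_bond_actor; infer_instance

-- ===== CLAIM (what is proved, stated in full; the proofs are below) =====
def Claim_equal_find_favorite_bond_actor : Prop := ∀ (birth_year : Int), Dom_find_favorite_bond_actor birth_year → Spec_find_favorite_bond_actor birth_year (find_favorite_bond_actor birth_year)

-- ===== LEMMAS AND PROOFS =====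

-- the binary search over the concrete breakpoint table, unrolled to its decision tree
theorem pvBisect_eval (y : Int) : pvBisectRight [1973, 1987, 1995, 2006, 2022] y 0 5 =
    if y < 1995 then (if y < 1987 then (if y < 1973 then 0 else 1) else 2)
    else (if y < 2022 then (if y < 2006 then 3 else 4) else 5) := by
  unfold pvBisectRight
  norm_num
  rw [show (5 : Nat) = 4 + 1 from rfl, pvBisectGo]; norm_num
  by_cases h2 : y < 1995
  · rw [if_pos h2, if_pos h2, show (4 : Nat) = 3 + 1 from rfl, pvBisectGo]; norm_num
    by_cases h1 : y < 1987
    · rw [if_pos h1, if_pos h1, show (3 : Nat) = 2 + 1 from rfl, pvBisectGo]; norm_num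
      by_cases h0 : y < 1973
      · rw [if_pos h0, if_pos h0, show (2 : Nat) = 1 + 1 from rfl, pvBisectGo]; norm_num
      · rw [if_neg h0, if_neg h0, show (2 : Nat) = 1 + 1 from rfl, pvBisectGo]; norm_num
    · rw [if_neg h1, if_neg h1, show (3 : Nat) = 2 + 1 from rfl, pvBisectGo]; norm_num
  · rw [if_neg h2, if_neg h2, show (4 : Nat) = 3 + 1 from rfl, pvBisectGo]; norm_num
    by_cases h4 : y < 2022
    · rw [if_pos h4, if_pos h4, show (3 : Nat) = 2 + 1 from rfl, pvBisectGo]; norm_num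
      by_cases h3 : y < 2006
      · rw [if_pos h3, if_pos h3, show (2 : Nat) = 1 + 1 from rfl, pvBisectGo]; norm_num
      · rw [if_neg h3, if_neg h3, show (2 : Nat) = 1 + 1 from rfl, pvBisectGo]; norm_num
    · rw [if_neg h4, if_neg h4, show (3 : Nat) = 2 + 1 from rfl, pvBisectGo]; norm_num

-- ===== VERDICT (by name: the statement is the Claim_ definition above) =====
theorem find_favorite_bond_actor_spec : Claim_equal_find_favorite_bond_actor := by
  intro birth_year _
  unfold Spec_find_favorite_bond_actor find_favorite_bond_actor find_favorite_bond_actor_alt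
  simp only [List.length_cons, List.length_nil]
  rw [show (0+1+1+1+1+1 : Nat) = 5 from rfl, pvBisect_eval]
  simp only [pvScanA]
  split_ifs <;>
    first
      | rfl
      | omega
      | (exact absurd ‹False ∨ _› (by norm_num))
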